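-- pv_equiv track=rewrite | github.com/anshikasrv/gemAI | backend/app/services/zip.py | _decode_escaped_source
-- ===== SOURCE A (Python) =====
-- def _decode_escaped_source(content: str) -> str:
--     """Convert common JSON-escaped source text into real file content."""
--     if "\\" not in content:
--         return content
--
--     if not any(token in content for token in ("\\n", "\\r", "\\t", '\\"')):
--         return content
--
--     return (
--         content
--         .replace("\\r\\n", "\n")
--         .replace("\\n", "\n")
--         .replace("\\r", "\r")
--         .replace("\\t", "\t")
--         .replace('\\"', '"')
--     )
-- ===== SOURCE B (Python) =====
-- def _decode_escaped_source(content: str) -> str: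
--     """Single left-to-right scan decoding the escape tokens in chain-priority order."""
--     out = []
--     i = 0
--     n = len(content)
--     while i < n:
--         if content.startswith('\\r\\n', i):
--             out.append('\n')
--             i += 4
--         elif content.startswith('\\n', i):
--             out.append('\n')
--             i += 2
--         elif content.startswith('\\r', i):
--             out.append('\r')
--             i += 2
--         elif content.startswith('\\t', i):
--             out.append('\t')
--             i += 2
--         elif content.startswith('\\"', i):
--             out.append('"')
--             i += 2
--         else:
--             out.append(content[i])
--             i += 1
--     return ''.join(out)
-- ===== Notes on version B (the rewrite author's own statement) =====
-- stated objective: alternative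
-- what changed: The five chained whole-string .replace passes are replaced by a single left-to-right scanner that tests the escape tokens in the chain's priority order at each position and emits the decoded character directly.
import Mathlib
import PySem

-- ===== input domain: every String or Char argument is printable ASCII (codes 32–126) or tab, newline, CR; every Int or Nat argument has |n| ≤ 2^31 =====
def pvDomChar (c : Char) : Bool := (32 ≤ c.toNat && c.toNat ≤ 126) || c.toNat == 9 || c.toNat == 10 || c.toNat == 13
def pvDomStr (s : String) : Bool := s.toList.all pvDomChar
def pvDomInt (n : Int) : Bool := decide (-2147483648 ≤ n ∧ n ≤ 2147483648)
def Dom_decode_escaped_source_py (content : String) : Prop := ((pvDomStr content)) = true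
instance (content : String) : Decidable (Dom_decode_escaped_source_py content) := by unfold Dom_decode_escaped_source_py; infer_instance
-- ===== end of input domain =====

-- B replaces A's five chained whole-string .replace passes by one left-to-right scanner
-- that decodes each escape token in the chain's priority order (objective: alternative).

-- ===== PORT A =====
-- literal transliteration of A: two early-return guards, then five chained replaces
def decode_escaped_source_py (content : String) : String :=
  if !(PySem.Str.isIn "\\" content) then content
  else if !(([("\\n" : String), "\\r", "\\t", "\\\""].any
              (fun token => PySem.Str.isIn token content))) then content
  else
    PySem.Str.replace
      (PySem.Str.replace
        (PySem.Str.replace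
          (PySem.Str.replace
            (PySem.Str.replace content "\\r\\n" "\n")
            "\\n" "\n")
          "\\r" "\r")
        "\\t" "\t")
      "\\\"" "\""

-- ===== PORT B =====
-- B-side helper: Source B's while loop (startswith tests in priority order, emit, skip)
-- as recursion on the remaining character list
def scanB (cs : List Char) : List Char :=
  match cs with
  | [] => []
  | c :: t =>
    if ['\\', 'r', '\\', 'n'].isPrefixOf (c :: t) then '\n' :: scanB (t.drop 3)
    else if ['\\', 'n'].isPrefixOf (c :: t) then '\n' :: scanB (t.drop 1)
    else if ['\\', 'r'].isPrefixOf (c :: t) then '\r' :: scanB (t.drop 1)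
    else if ['\\', 't'].isPrefixOf (c :: t) then '\t' :: scanB (t.drop 1)
    else if ['\\', '"'].isPrefixOf (c :: t) then '"' :: scanB (t.drop 1)
    else c :: scanB t
termination_by cs.length
decreasing_by all_goals (simp [List.length_drop]; try omega)

def decode_escaped_source_py_alt (content : String) : String :=
  String.ofList (scanB content.toList)

-- ===== PRECONDITION & SPEC =====
def Spec_decode_escaped_source_py (content : String) (out : String) : Prop := out = decode_escaped_source_py_alt content
instance (content : String) (out : String) : Decidable (Spec_decode_escaped_source_py content out) := by unfold Spec_decode_escaped_source_py; infer_instance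

-- ===== CLAIM (what is proved, stated in full; the proofs are below) =====
def Claim_equal_decode_escaped_source_py : Prop := ∀ (content : String), Dom_decode_escaped_source_py content → Spec_decode_escaped_source_py content (decode_escaped_source_py content)

-- ===== LEMMAS AND PROOFS =====

-- proof-side model of Python's str.replace with a nonempty pattern (o :: os)
def repl (o : Char) (os new cs : List Char) : List Char :=
  match cs with
  | [] => []
  | c :: t =>
    if (o :: os).isPrefixOf (c :: t) then new ++ repl o os new (t.drop os.length)
    else c :: repl o os new t
termination_by cs.length
decreasing_by all_goals (simp [List.length_drop]; try omega)

theorem repl_nil (o : Char) (os new : List Char) : repl o os new [] = [] := by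
  simp [repl]

theorem replace_go_eq (o : Char) (os new : List Char) :
    ∀ (fuel : Nat) (l acc : List Char), l.length ≤ fuel →
      PySem.Chars.replace.go (o :: os) new fuel l acc = acc.reverse ++ repl o os new l := by
  intro fuel
  induction fuel with
  | zero =>
    intro l acc hl
    have : l = [] := List.eq_nil_of_length_eq_zero (Nat.le_zero.mp hl)
    subst this
    simp [PySem.Chars.replace.go, repl_nil]
  | succ fuel ih =>
    intro l acc hl
    cases l with
    | nil => simp [PySem.Chars.replace.go, repl_nil]
    | cons c t =>
      rw [PySem.Chars.replace.go]
      by_cases hp : (o :: os).isPrefixOf (c :: t)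
      · rw [if_pos hp]
        rw [ih _ _ (by simp at hl ⊢; omega)]
        rw [repl]
        rw [if_pos hp]
        simp [List.drop_succ_cons]
      · rw [if_neg hp]
        rw [ih _ _ (by simp at hl; omega)]
        rw [repl]
        rw [if_neg hp]
        simp

theorem chars_replace_eq_repl (o : Char) (os new cs : List Char) :
    PySem.Chars.replace cs (o :: os) new = repl o os new cs := by
  unfold PySem.Chars.replace
  simp [replace_go_eq o os new cs.length cs [] le_rfl]

-- pass-through: a nonmatching head character is copied
theorem repl_cons_pass (o o2 : Char) (os' new : List Char) (c : Char) (ys : List Char)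
    (h : c ≠ o ∨ ys.head? ≠ some o2) :
    repl o (o2 :: os') new (c :: ys) = c :: repl o (o2 :: os') new ys := by
  rw [repl]
  rw [if_neg]
  intro hp
  rcases h with h | h
  · simp [List.isPrefixOf] at hp
    exact h hp.1.symm
  · cases ys with
    | nil => simp [List.isPrefixOf] at hp
    | cons y ys' =>
      simp [List.isPrefixOf] at hp
      exact h (by simp [hp.2.1.symm])

-- the head of a replace output is either the (singleton) replacement or the old head
theorem repl_head (o : Char) (os : List Char) (e : Char) (cs : List Char) :
    (repl o os [e] cs).head? = some e ∨ (repl o os [e] cs).head? = cs.head? := by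
  cases cs with
  | nil => right; simp [repl_nil]
  | cons c t =>
    rw [repl]
    by_cases hp : (o :: os).isPrefixOf (c :: t)
    · rw [if_pos hp]; left; simp
    · rw [if_neg hp]; right; simp

-- the five replace passes chained, on character lists
def chainL (cs : List Char) : List Char :=
  repl '\\' ['"'] ['"']
    (repl '\\' ['t'] ['\t']
      (repl '\\' ['r'] ['\r']
        (repl '\\' ['n'] ['\n']
          (repl '\\' ['r', '\\', 'n'] ['\n'] cs))))

theorem chain_eq_scan (cs : List Char) : chainL cs = scanB cs := by
  induction hn : cs.length using Nat.strong_induction_on generalizing cs with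
  | _ n ih =>
  subst hn
  cases cs with
  | nil => simp [chainL, repl_nil, scanB]
  | cons c t =>
    by_cases hc : c = '\\'
    · subst hc
      cases t with
      | nil =>
        simp [chainL, scanB, repl, List.isPrefixOf]
      | cons d u =>
        by_cases hdr : d = 'r'
        · subst hdr
          by_cases h4 : ['\\', 'n'].isPrefixOf u
          · -- '\r\n' escape
            obtain ⟨v, hv⟩ := List.isPrefixOf_iff_prefix.mp h4
            have hu : u = '\\' :: 'n' :: v := by simpa using hv.symm
            subst hu
            have E : chainL ('\\' :: 'r' :: '\\' :: 'n' :: v) = '\n' :: chainL v := by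
              simp only [chainL]
              rw [show repl '\\' ['r', '\\', 'n'] ['\n'] ('\\' :: 'r' :: '\\' :: 'n' :: v) =
                    '\n' :: repl '\\' ['r', '\\', 'n'] ['\n'] v by
                rw [repl]; simp [List.isPrefixOf]]
              rw [repl_cons_pass '\\' 'n' _ _ '\n' _ (Or.inl (by decide)),
                  repl_cons_pass '\\' 'r' _ _ '\n' _ (Or.inl (by decide)),
                  repl_cons_pass '\\' 't' _ _ '\n' _ (Or.inl (by decide)),
                  repl_cons_pass '\\' '"' _ _ '\n' _ (Or.inl (by decide))]
            have S : scanB ('\\' :: 'r' :: '\\' :: 'n' :: v) = '\n' :: scanB v := by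
              rw [scanB]; rw [if_pos (by simp [List.isPrefixOf])]; simp
            rw [E, S, ih v.length (by simp only [List.length_cons]; omega) v rfl]
          · -- '\r' escape (not followed by '\n')
            have hnp4 : ¬ ['\\', 'r', '\\', 'n'].isPrefixOf ('\\' :: 'r' :: u) = true := by
              intro hp
              obtain ⟨v, hv⟩ := List.isPrefixOf_iff_prefix.mp hp
              have hu : u = '\\' :: 'n' :: v := by
                have := hv.symm
                simp only [List.cons_append, List.nil_append, List.cons.injEq] at this
                exact this.2.2
              subst hu
              exact h4 (by simp [List.isPrefixOf])
            have E : chainL ('\\' :: 'r' :: u) = '\r' :: chainL u := by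
              simp only [chainL]
              rw [show repl '\\' ['r', '\\', 'n'] ['\n'] ('\\' :: 'r' :: u) =
                    '\\' :: 'r' :: repl '\\' ['r', '\\', 'n'] ['\n'] u by
                rw [repl, if_neg hnp4,
                    repl_cons_pass '\\' 'r' _ _ 'r' _ (Or.inl (by decide))]]
              rw [repl_cons_pass '\\' 'n' _ _ '\\' _ (Or.inr (by simp)),
                  repl_cons_pass '\\' 'n' _ _ 'r' _ (Or.inl (by decide))]
              rw [show repl '\\' ['r'] ['\r']
                    ('\\' :: 'r' :: repl '\\' ['n'] ['\n'] (repl '\\' ['r', '\\', 'n'] ['\n'] u)) =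
                    '\r' :: repl '\\' ['r'] ['\r']
                      (repl '\\' ['n'] ['\n'] (repl '\\' ['r', '\\', 'n'] ['\n'] u)) by
                rw [repl]; rw [if_pos (by simp [List.isPrefixOf])]; simp]
              rw [repl_cons_pass '\\' 't' _ _ '\r' _ (Or.inl (by decide)),
                  repl_cons_pass '\\' '"' _ _ '\r' _ (Or.inl (by decide))]
            have S : scanB ('\\' :: 'r' :: u) = '\r' :: scanB u := by
              rw [scanB]
              rw [if_neg hnp4]
              rw [if_neg (by simp [List.isPrefixOf])]
              rw [if_pos (by simp [List.isPrefixOf])]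
              simp
            rw [E, S, ih u.length (by simp only [List.length_cons]; omega) u rfl]
        · by_cases hdn : d = 'n'
          · subst hdn
            have E : chainL ('\\' :: 'n' :: u) = '\n' :: chainL u := by
              simp only [chainL]
              rw [repl_cons_pass '\\' 'r' _ _ '\\' _ (Or.inr (by simp)),
                  repl_cons_pass '\\' 'r' _ _ 'n' _ (Or.inl (by decide))]
              rw [show repl '\\' ['n'] ['\n']
                    ('\\' :: 'n' :: repl '\\' ['r', '\\', 'n'] ['\n'] u) =
                    '\n' :: repl '\\' ['n'] ['\n'] (repl '\\' ['r', '\\', 'n'] ['\n'] u) by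
                rw [repl]; rw [if_pos (by simp [List.isPrefixOf])]; simp]
              rw [repl_cons_pass '\\' 'r' _ _ '\n' _ (Or.inl (by decide)),
                  repl_cons_pass '\\' 't' _ _ '\n' _ (Or.inl (by decide)),
                  repl_cons_pass '\\' '"' _ _ '\n' _ (Or.inl (by decide))]
            have S : scanB ('\\' :: 'n' :: u) = '\n' :: scanB u := by
              rw [scanB]
              rw [if_neg (by simp [List.isPrefixOf])]
              rw [if_pos (by simp [List.isPrefixOf])]
              simp
            rw [E, S, ih u.length (by simp only [List.length_cons]; omega) u rfl]
          · by_cases hdt : d = 't'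
            · subst hdt
              have E : chainL ('\\' :: 't' :: u) = '\t' :: chainL u := by
                simp only [chainL]
                rw [repl_cons_pass '\\' 'r' _ _ '\\' _ (Or.inr (by simp)),
                    repl_cons_pass '\\' 'r' _ _ 't' _ (Or.inl (by decide))]
                rw [repl_cons_pass '\\' 'n' _ _ '\\' _ (Or.inr (by simp)),
                    repl_cons_pass '\\' 'n' _ _ 't' _ (Or.inl (by decide))]
                rw [repl_cons_pass '\\' 'r' _ _ '\\' _ (Or.inr (by simp)),
                    repl_cons_pass '\\' 'r' _ _ 't' _ (Or.inl (by decide))]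
                rw [show repl '\\' ['t'] ['\t']
                      ('\\' :: 't' :: repl '\\' ['r'] ['\r'] (repl '\\' ['n'] ['\n']
                        (repl '\\' ['r', '\\', 'n'] ['\n'] u))) =
                      '\t' :: repl '\\' ['t'] ['\t'] (repl '\\' ['r'] ['\r'] (repl '\\' ['n'] ['\n']
                        (repl '\\' ['r', '\\', 'n'] ['\n'] u))) by
                  rw [repl]; rw [if_pos (by simp [List.isPrefixOf])]; simp]
                rw [repl_cons_pass '\\' '"' _ _ '\t' _ (Or.inl (by decide))]
              have S : scanB ('\\' :: 't' :: u) = '\t' :: scanB u := by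
                rw [scanB]
                rw [if_neg (by simp [List.isPrefixOf])]
                rw [if_neg (by simp [List.isPrefixOf])]
                rw [if_neg (by simp [List.isPrefixOf])]
                rw [if_pos (by simp [List.isPrefixOf])]
                simp
              rw [E, S, ih u.length (by simp only [List.length_cons]; omega) u rfl]
            · by_cases hdq : d = '"'
              · subst hdq
                have E : chainL ('\\' :: '"' :: u) = '"' :: chainL u := by
                  simp only [chainL]
                  rw [repl_cons_pass '\\' 'r' _ _ '\\' _ (Or.inr (by simp)),
                      repl_cons_pass '\\' 'r' _ _ '"' _ (Or.inl (by decide))]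
                  rw [repl_cons_pass '\\' 'n' _ _ '\\' _ (Or.inr (by simp)),
                      repl_cons_pass '\\' 'n' _ _ '"' _ (Or.inl (by decide))]
                  rw [repl_cons_pass '\\' 'r' _ _ '\\' _ (Or.inr (by simp)),
                      repl_cons_pass '\\' 'r' _ _ '"' _ (Or.inl (by decide))]
                  rw [repl_cons_pass '\\' 't' _ _ '\\' _ (Or.inr (by simp)),
                      repl_cons_pass '\\' 't' _ _ '"' _ (Or.inl (by decide))]
                  rw [show repl '\\' ['"'] ['"']
                        ('\\' :: '"' :: repl '\\' ['t'] ['\t'] (repl '\\' ['r'] ['\r']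
                          (repl '\\' ['n'] ['\n'] (repl '\\' ['r', '\\', 'n'] ['\n'] u)))) =
                        '"' :: repl '\\' ['"'] ['"'] (repl '\\' ['t'] ['\t'] (repl '\\' ['r'] ['\r']
                          (repl '\\' ['n'] ['\n'] (repl '\\' ['r', '\\', 'n'] ['\n'] u)))) by
                    rw [repl]; rw [if_pos (by simp [List.isPrefixOf])]; simp]
                have S : scanB ('\\' :: '"' :: u) = '"' :: scanB u := by
                  rw [scanB]
                  rw [if_neg (by simp [List.isPrefixOf])]
                  rw [if_neg (by simp [List.isPrefixOf])]
                  rw [if_neg (by simp [List.isPrefixOf])]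
                  rw [if_neg (by simp [List.isPrefixOf])]
                  rw [if_pos (by simp [List.isPrefixOf])]
                  simp
                rw [E, S, ih u.length (by simp only [List.length_cons]; omega) u rfl]
              · -- copied backslash: no escape starts here
                have h1 := repl_head '\\' ['r', '\\', 'n'] '\n' (d :: u)
                have h2 := repl_head '\\' ['n'] '\n' (repl '\\' ['r', '\\', 'n'] ['\n'] (d :: u))
                have h3 := repl_head '\\' ['r'] '\r'
                  (repl '\\' ['n'] ['\n'] (repl '\\' ['r', '\\', 'n'] ['\n'] (d :: u)))
                have h4 := repl_head '\\' ['t'] '\t' (repl '\\' ['r'] ['\r']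
                  (repl '\\' ['n'] ['\n'] (repl '\\' ['r', '\\', 'n'] ['\n'] (d :: u))))
                have E : chainL ('\\' :: d :: u) = '\\' :: chainL (d :: u) := by
                  simp only [chainL]
                  rw [repl_cons_pass '\\' 'r' _ _ '\\' (d :: u) (Or.inr (by simp [hdr]))]
                  rw [repl_cons_pass '\\' 'n' _ _ '\\' _
                        (Or.inr (by rcases h1 with h | h
                                    · rw [h]; decide
                                    · rw [h]; simp [hdn]))]
                  rw [repl_cons_pass '\\' 'r' _ _ '\\' _
                        (Or.inr (by rcases h2 with h | h
                                    · rw [h]; decide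
                                    · rw [h]
                                      rcases h1 with h' | h'
                                      · rw [h']; decide
                                      · rw [h']; simp [hdr]))]
                  rw [repl_cons_pass '\\' 't' _ _ '\\' _
                        (Or.inr (by rcases h3 with h | h
                                    · rw [h]; decide
                                    · rw [h]
                                      rcases h2 with h' | h'
                                      · rw [h']; decide
                                      · rw [h']
                                        rcases h1 with h'' | h''
                                        · rw [h'']; decide
                                        · rw [h'']; simp [hdt]))]
                  rw [repl_cons_pass '\\' '"' _ _ '\\' _
                        (Or.inr (by rcases h4 with h | h
                                    · rw [h]; decide
                                    · rw [h]
                                      rcases h3 with h' | h'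
                                      · rw [h']; decide
                                      · rw [h']
                                        rcases h2 with h'' | h''
                                        · rw [h'']; decide
                                        · rw [h'']
                                          rcases h1 with h3' | h3'
                                          · rw [h3']; decide
                                          · rw [h3']; simp [hdq]))]
                have S : scanB ('\\' :: d :: u) = '\\' :: scanB (d :: u) := by
                  rw [scanB]
                  rw [if_neg (by simp [List.isPrefixOf]; exact fun h => absurd h.symm hdr)]
                  rw [if_neg (by simp [List.isPrefixOf]; exact fun h => absurd h.symm hdn)]
                  rw [if_neg (by simp [List.isPrefixOf]; exact fun h => absurd h.symm hdr)]
                  rw [if_neg (by simp [List.isPrefixOf]; exact fun h => absurd h.symm hdt)]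
                  rw [if_neg (by simp [List.isPrefixOf]; exact fun h => absurd h.symm hdq)]
                rw [E, S, ih (d :: u).length (by simp only [List.length_cons]; omega) (d :: u) rfl]
    · -- ordinary character: every pass and the scanner copy it
      have S : scanB (c :: t) = c :: scanB t := by
        rw [scanB]
        rw [if_neg (by simp [List.isPrefixOf]; exact fun h => absurd h.symm hc)]
        rw [if_neg (by simp [List.isPrefixOf]; exact fun h => absurd h.symm hc)]
        rw [if_neg (by simp [List.isPrefixOf]; exact fun h => absurd h.symm hc)]
        rw [if_neg (by simp [List.isPrefixOf]; exact fun h => absurd h.symm hc)]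
        rw [if_neg (by simp [List.isPrefixOf]; exact fun h => absurd h.symm hc)]
      have E : chainL (c :: t) = c :: chainL t := by
        simp only [chainL]
        rw [repl_cons_pass '\\' 'r' _ _ c _ (Or.inl hc),
            repl_cons_pass '\\' 'n' _ _ c _ (Or.inl hc),
            repl_cons_pass '\\' 'r' _ _ c _ (Or.inl hc),
            repl_cons_pass '\\' 't' _ _ c _ (Or.inl hc),
            repl_cons_pass '\\' '"' _ _ c _ (Or.inl hc)]
      rw [E, S, ih t.length (by simp only [List.length_cons]; omega) t rfl]

theorem scan_id (cs : List Char)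
    (h1 : ¬ ['\\', 'n'] <:+: cs) (h2 : ¬ ['\\', 'r'] <:+: cs)
    (h3 : ¬ ['\\', 't'] <:+: cs) (h4 : ¬ ['\\', '"'] <:+: cs) : scanB cs = cs := by
  induction hn : cs.length using Nat.strong_induction_on generalizing cs with
  | _ n ih =>
  subst hn
  cases cs with
  | nil => simp [scanB]
  | cons c t =>
    rw [scanB]
    rw [if_neg (fun hp => by
      obtain ⟨v, hv⟩ := List.isPrefixOf_iff_prefix.mp hp
      exact h1 ⟨['\\', 'r'], v, by rw [← hv]; rfl⟩)]
    rw [if_neg (fun hp => h1 (List.isPrefixOf_iff_prefix.mp hp).isInfix)]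
    rw [if_neg (fun hp => h2 (List.isPrefixOf_iff_prefix.mp hp).isInfix)]
    rw [if_neg (fun hp => h3 (List.isPrefixOf_iff_prefix.mp hp).isInfix)]
    rw [if_neg (fun hp => h4 (List.isPrefixOf_iff_prefix.mp hp).isInfix)]
    rw [ih t.length (by simp) t
      (fun h => h1 (List.infix_cons h)) (fun h => h2 (List.infix_cons h))
      (fun h => h3 (List.infix_cons h)) (fun h => h4 (List.infix_cons h)) rfl]

-- ===== VERDICT (by name: the statement is the Claim_ definition above) =====
theorem decode_escaped_source_py_spec : Claim_equal_decode_escaped_source_py := by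
  intro content _
  unfold Spec_decode_escaped_source_py decode_escaped_source_py decode_escaped_source_py_alt
  have tok_rn : ("\\r\\n" : String).toList = ['\\', 'r', '\\', 'n'] := by decide
  have tok_n : ("\\n" : String).toList = ['\\', 'n'] := by decide
  have tok_r : ("\\r" : String).toList = ['\\', 'r'] := by decide
  have tok_t : ("\\t" : String).toList = ['\\', 't'] := by decide
  have tok_q : ("\\\"" : String).toList = ['\\', '"'] := by decide
  have tok_bs : ("\\" : String).toList = ['\\'] := by decide
  split_ifs with g1 g2
  · -- no backslash at all
    simp [PySem.Str.isIn, PySem.Chars.isIn_eq_false_iff, tok_bs] at g1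
    have hb : '\\' ∉ content.toList := by
      intro hm
      obtain ⟨l, r, hlr⟩ := List.append_of_mem hm
      exact g1 ⟨l, r, by rw [hlr]; simp⟩
    rw [scan_id content.toList
      (fun h => hb (h.subset (by simp))) (fun h => hb (h.subset (by simp)))
      (fun h => hb (h.subset (by simp))) (fun h => hb (h.subset (by simp)))]
    simp
  · -- backslash but none of the four tokens
    simp [PySem.Str.isIn, PySem.Chars.isIn_eq_false_iff, tok_n, tok_r, tok_t, tok_q] at g2
    rw [scan_id content.toList g2.1 g2.2.1 g2.2.2.1 g2.2.2.2]
    simp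
  · -- the chain
    simp only [PySem.Str.replace, String.toList_ofList]
    rw [tok_rn, tok_n, tok_r, tok_t, tok_q]
    rw [show ("\n" : String).toList = ['\n'] from by decide,
        show ("\r" : String).toList = ['\r'] from by decide,
        show ("\t" : String).toList = ['\t'] from by decide,
        show ("\"" : String).toList = ['"'] from by decide]
    simp only [chars_replace_eq_repl]
    have := chain_eq_scan content.toList
    simp only [chainL] at this
    rw [this]
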